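-- pv_equiv track=rewrite | github.com/jsmtaa/dsa-practice | problems/format_string_validator.py | is_valid_format
-- ===== SOURCE A (Python) =====
-- def is_valid_format(s):
--     order = {'d': 0, 'f': 1, 'c': 2, 's': 3}
--     max_seen = -1
--     i = 0
--     n = len(s)
--
--     while i < n:
--         ch = s[i]
--
--         # handle placeholders
--         if ch == '%':
--             if i + 1 >= n or s[i + 1] not in order:
--                 return "INVALID"
--             curr = order[s[i + 1]]
--             if curr < max_seen:
--                 return "INVALID"
--             max_seen = curr
--             i += 2
--             continue
--
--         # handle escape sequences
--         if ch == '\\':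
--             if i + 1 >= n or s[i + 1] not in {'n', 't', '\\', '"'}:
--                 return "INVALID"
--             i += 2
--             continue
--
--         i += 1
--
--     return "VALID"
-- ===== SOURCE B (Python) =====
-- def is_valid_format(s):
--     # Phase 1: tokenize -- validate escapes/placeholders, collect placeholder letters in order.
--     letters = []
--     stack = list(reversed(s))
--     while stack:
--         c = stack.pop()
--         if c == '%':
--             if not stack or stack[-1] not in 'dfcs':
--                 return "INVALID"
--             letters.append(stack.pop())
--         elif c == '\\':
--             if not stack or stack[-1] not in 'nt\\"':
--                 return "INVALID"
--             stack.pop()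
--     # Phase 2: placeholder kinds must appear in non-decreasing order d < f < c < s.
--     order = {'d': 0, 'f': 1, 'c': 2, 's': 3}
--     vals = [order[c] for c in letters]
--     return "VALID" if all(a <= b for a, b in zip(vals, vals[1:])) else "INVALID"
-- ===== Notes on version B (the rewrite author's own statement) =====
-- stated objective: alternative
-- what changed: A's fused single-pass state machine (index jumping with a running max of placeholder ranks) is replaced by a two-phase decomposition: a tokenizer that validates escapes/placeholders and collects the placeholder letters, followed by a separate non-decreasing-order check over the letter ranks (zip of adjacent pairs).
import Mathlib
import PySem

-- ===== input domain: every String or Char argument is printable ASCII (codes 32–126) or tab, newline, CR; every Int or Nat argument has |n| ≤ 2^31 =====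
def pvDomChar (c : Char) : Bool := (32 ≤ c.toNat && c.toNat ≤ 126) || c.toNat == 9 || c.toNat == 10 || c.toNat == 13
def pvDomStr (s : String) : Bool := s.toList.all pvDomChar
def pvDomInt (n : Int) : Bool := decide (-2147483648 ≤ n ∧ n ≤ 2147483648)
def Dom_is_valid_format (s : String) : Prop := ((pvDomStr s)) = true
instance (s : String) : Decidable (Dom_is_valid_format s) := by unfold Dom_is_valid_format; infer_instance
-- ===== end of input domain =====

-- B replaces A's fused index-jumping state machine (running max) by a two-phase
-- tokenize-then-check-order decomposition (objective: alternative, same cost).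

-- ===== PORT A =====
-- A's order dict {'d':0,'f':1,'c':2,'s':3}
def pvOrderDict : PySem.Dict Char Int :=
  ((((PySem.Dict.empty).insert 'd' 0).insert 'f' 1).insert 'c' 2).insert 's' 3

-- A's while loop: index i, running max_seen; s[i] is read as cs.getD i ' ' (always in range where it is evaluated, since i < n resp. the short-circuited i+1 < n guard holds).
def pvLoopA (cs : List Char) (n : Nat) (i : Nat) (maxSeen : Int) : String :=
  if i < n then
    let ch := cs.getD i ' '
    if ch = '%' then
      if i + 1 ≥ n ∨ ¬ (pvOrderDict.contains (cs.getD (i+1) ' ') = true) then "INVALID"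
      else
        let curr := pvOrderDict.getD (cs.getD (i+1) ' ') 0
        if curr < maxSeen then "INVALID"
        else pvLoopA cs n (i+2) curr
    else if ch = '\\' then
      if i + 1 ≥ n ∨ ¬ (cs.getD (i+1) ' ' ∈ ['n', 't', '\\', '"']) then "INVALID"
      else pvLoopA cs n (i+2) maxSeen
    else pvLoopA cs n (i+1) maxSeen
  else "VALID"
termination_by n - i

def is_valid_format (s : String) : String :=
  pvLoopA s.toList s.toList.length 0 (-1)

-- ===== PORT B =====
-- B's phase-1 while loop: the Python pops a stack holding the chars of s reversed,
-- i.e. it consumes the chars of s front to back; the Lean mirror recurses on that same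
-- front-to-back sequence.  `return "INVALID"` becomes `none`; `letters` is the Python list.
def pvScanB : List Char → List Char → Option (List Char)
  | [], letters => some letters
  | c :: stack, letters =>
    if c = '%' then
      match stack with
      | [] => none
      | d :: stack' =>
        if PySem.Chars.isIn [d] ['d', 'f', 'c', 's'] then pvScanB stack' (letters ++ [d]) else none
    else if c = '\\' then
      match stack with
      | [] => none
      | d :: stack' =>
        if PySem.Chars.isIn [d] ['n', 't', '\\', '"'] then pvScanB stack' letters else none
    else pvScanB stack letters

def is_valid_format_alt (s : String) : String :=
  match pvScanB s.toList [] with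
  | none => "INVALID"
  | some letters =>
    let vals := letters.map (fun c => pvOrderDict.getD c 0)
    if (List.zip vals vals.tail).all (fun p => decide (p.1 ≤ p.2)) then "VALID" else "INVALID"

-- ===== PRECONDITION & SPEC =====
def Spec_is_valid_format (s : String) (out : String) : Prop := out = is_valid_format_alt s
instance (s : String) (out : String) : Decidable (Spec_is_valid_format s out) := by unfold Spec_is_valid_format; infer_instance

-- ===== CLAIM (what is proved, stated in full; the proofs are below) =====
def Claim_equal_is_valid_format : Prop := ∀ (s : String), Dom_is_valid_format s → Spec_is_valid_format s (is_valid_format s)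

-- ===== LEMMAS AND PROOFS =====

theorem pvOrderDict_eq : pvOrderDict = ⟨[('d',0),('f',1),('c',2),('s',3)]⟩ := by rfl

theorem pvOrderDict_contains (d : Char) :
    pvOrderDict.contains d = (d == 'd' || d == 'f' || d == 'c' || d == 's') := by
  rw [pvOrderDict_eq]; simp [PySem.Dict.contains, BEq.comm, Bool.or_assoc]

theorem pvOrderDict_getD (d : Char) : pvOrderDict.getD d 0 =
    (if d = 'd' then 0 else if d = 'f' then 1 else if d = 'c' then 2 else if d = 's' then 3 else 0) := by
  by_cases h1 : d = 'd'
  · subst h1; decide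
  by_cases h2 : d = 'f'
  · subst h2; decide
  by_cases h3 : d = 'c'
  · subst h3; decide
  by_cases h4 : d = 's'
  · subst h4; decide
  have b1 : ('d' == d) = false := by simp [Ne.symm h1]
  have b2 : ('f' == d) = false := by simp [Ne.symm h2]
  have b3 : ('c' == d) = false := by simp [Ne.symm h3]
  have b4 : ('s' == d) = false := by simp [Ne.symm h4]
  rw [pvOrderDict_eq]
  simp [PySem.Dict.getD, PySem.Dict.get?, List.find?, b1, b2, b3, b4, h1, h2, h3, h4]

theorem pvOrderDict_getD_nonneg (d : Char) : (0 : Int) ≤ pvOrderDict.getD d 0 := by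
  rw [pvOrderDict_getD]; split_ifs <;> omega

-- "single char in string" membership is list membership
theorem pvIsIn_singleton (d : Char) (l : List Char) :
    PySem.Chars.isIn [d] l = decide (d ∈ l) := by
  rcases h : PySem.Chars.isIn [d] l with _|_
  · rw [PySem.Chars.isIn_eq_false_iff, List.singleton_infix_iff] at h; simp [h]
  · rw [PySem.Chars.isIn_iff_infix, List.singleton_infix_iff] at h; simp [h]

-- proof-side structural version of A's loop (over the remaining suffix)
def pvListA : List Char → Int → String
  | [], _ => "VALID"
  | c :: st, m =>
    if c = '%' then
      match st with
      | [] => "INVALID"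
      | d :: st' =>
        if pvOrderDict.contains d = true then
          (if pvOrderDict.getD d 0 < m then "INVALID" else pvListA st' (pvOrderDict.getD d 0))
        else "INVALID"
    else if c = '\\' then
      match st with
      | [] => "INVALID"
      | d :: st' => if d ∈ ['n', 't', '\\', '"'] then pvListA st' m else "INVALID"
    else pvListA st m

-- A's index loop computes the structural version on the suffix
theorem pvLoopA_eq_listA (cs : List Char) : ∀ (i : Nat) (m : Int),
    pvLoopA cs cs.length i m = pvListA (cs.drop i) m := by
  have main : ∀ (k i : Nat) (m : Int), cs.length - i ≤ k →
      pvLoopA cs cs.length i m = pvListA (cs.drop i) m := by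
    intro k
    induction k with
    | zero =>
      intro i m hk
      have h : ¬ i < cs.length := by omega
      have hdrop : cs.drop i = [] := List.drop_eq_nil_iff.mpr (by omega)
      rw [pvLoopA]
      simp [h, hdrop, pvListA]
    | succ k IH =>
      intro i m hk
      by_cases h : i < cs.length
      · rw [pvLoopA, List.drop_eq_getElem_cons h]
        have hg : cs[i]? = some cs[i] := List.getElem?_eq_getElem h
        by_cases hp : cs[i] = '%'
        · by_cases hn : i + 1 < cs.length
          · rw [List.drop_eq_getElem_cons hn]
            have hg2 : cs[i+1]? = some cs[i+1] := List.getElem?_eq_getElem hn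
            have hnn : ¬ i + 1 ≥ cs.length := by omega
            by_cases hc : pvOrderDict.contains cs[i+1] = true
            · have hrec := IH (i+2) (pvOrderDict.getD cs[i+1] 0) (by omega)
              by_cases hlt : pvOrderDict.getD cs[i+1] 0 < m <;>
                simp [pvListA, h, hg, hg2, hp, hnn, hc, hlt, hrec]
            · simp [pvListA, h, hg, hg2, hp, hnn, hc]
          · have hdrop : cs.drop (i+1) = [] := List.drop_eq_nil_iff.mpr (by omega)
            have hge : i + 1 ≥ cs.length := by omega
            simp [pvListA, h, hg, hp, hdrop, hge]
        · by_cases hb : cs[i] = '\\'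
          · by_cases hn : i + 1 < cs.length
            · rw [List.drop_eq_getElem_cons hn]
              have hg2 : cs[i+1]? = some cs[i+1] := List.getElem?_eq_getElem hn
              have hnn : ¬ i + 1 ≥ cs.length := by omega
              by_cases hm : cs[i+1] ∈ (['n', 't', '\\', '"'] : List Char)
              · have hrec := IH (i+2) m (by omega)
                simp [pvListA, h, hg, hg2, hp, hb, hnn, hm, hrec]
              · simp [pvListA, h, hg, hg2, hp, hb, hnn, hm]
            · have hdrop : cs.drop (i+1) = [] := List.drop_eq_nil_iff.mpr (by omega)
              have hge : i + 1 ≥ cs.length := by omega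
              simp [pvListA, h, hg, hp, hb, hdrop, hge]
          · rw [if_pos h]
            rw [List.getD_eq_getElem cs ' ' h, if_neg hp, if_neg hb, IH (i+1) m (by omega)]
            conv_rhs => rw [pvListA.eq_def]
            simp only [if_neg hp, if_neg hb]
      · have hdrop : cs.drop i = [] := List.drop_eq_nil_iff.mpr (by omega)
        rw [pvLoopA]
        simp [h, hdrop, pvListA]
  intro i m
  exact main (cs.length - i) i m le_rfl

-- the letters accumulator of pvScanB just appends
theorem pvScanB_acc (st : List Char) : ∀ acc, pvScanB st acc = (pvScanB st []).map (acc ++ ·) := by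
  have main : ∀ (k : Nat) (st : List Char), st.length ≤ k →
      ∀ acc, pvScanB st acc = (pvScanB st []).map (acc ++ ·) := by
    intro k
    induction k with
    | zero =>
      intro st hk acc
      have : st = [] := List.eq_nil_of_length_eq_zero (by omega)
      subst this; simp [pvScanB]
    | succ k IH =>
      intro st hk acc
      match st with
      | [] => simp [pvScanB]
      | c :: rest =>
        rw [pvScanB.eq_def, pvScanB.eq_def]
        by_cases hp : c = '%'
        · simp only [hp, if_pos rfl]
          match rest with
          | [] => simp
          | d :: rest' =>
            by_cases hd : PySem.Chars.isIn [d] ['d', 'f', 'c', 's'] = true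
            · simp only [hd, if_pos rfl]
              rw [IH rest' (by simp at hk ⊢; omega) (acc ++ [d]),
                  IH rest' (by simp at hk ⊢; omega) ([] ++ [d])]
              cases pvScanB rest' [] <;> simp
            · simp [hd]
        · by_cases hb : c = '\\'
          · simp only [hp, hb, if_neg hp, if_pos rfl]
            match rest with
            | [] => simp
            | d :: rest' =>
              by_cases hd : PySem.Chars.isIn [d] ['n', 't', '\\', '"'] = true
              · simp only [hd, if_pos rfl]
                exact IH rest' (by simp at hk ⊢; omega) acc
              · simp [hd]
          · simp only [if_neg hp, if_neg hb]
            exact IH rest (by simp at hk ⊢; omega) acc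
  exact fun acc => main st.length st le_rfl acc

-- "values of the collected letters are non-decreasing starting from m"
def pvNdFrom (m : Int) : List Char → Bool
  | [] => true
  | c :: L => (decide (m ≤ pvOrderDict.getD c 0)) && pvNdFrom (pvOrderDict.getD c 0) L

-- A's structural loop = tokenize then check the chain
theorem pvListA_eq_scan : ∀ (st : List Char) (m : Int),
    pvListA st m = (match pvScanB st [] with
      | none => "INVALID"
      | some L => if pvNdFrom m L then "VALID" else "INVALID") := by
  have main : ∀ (k : Nat) (st : List Char), st.length ≤ k → ∀ m : Int,
      pvListA st m = (match pvScanB st [] with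
        | none => "INVALID"
        | some L => if pvNdFrom m L then "VALID" else "INVALID") := by
    intro k
    induction k with
    | zero =>
      intro st hk m
      have : st = [] := List.eq_nil_of_length_eq_zero (by omega)
      subst this; simp [pvScanB, pvListA, pvNdFrom]
    | succ k IH =>
      intro st hk m
      match st with
      | [] => simp [pvScanB, pvListA, pvNdFrom]
      | c :: rest =>
        rw [pvScanB.eq_def, pvListA.eq_def]
        by_cases hp : c = '%'
        · simp only [hp, if_pos rfl]
          match rest with
          | [] => simp
          | d :: rest' =>
            have hmem : (pvOrderDict.contains d = true) ↔
                (PySem.Chars.isIn [d] ['d', 'f', 'c', 's'] = true) := by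
              rw [pvOrderDict_contains, pvIsIn_singleton]; simp; tauto
            by_cases hd : pvOrderDict.contains d = true
            · have hd' := hmem.mp hd
              simp only [hd, hd', if_pos rfl]
              rw [pvScanB_acc rest' ([] ++ [d])]
              have hrec := IH rest' (by simp at hk ⊢; omega) (pvOrderDict.getD d 0)
              cases hsc : pvScanB rest' [] with
              | none =>
                rw [hsc] at hrec
                by_cases hlt : pvOrderDict.getD d 0 < m <;> simp [hlt, hrec]
              | some L =>
                rw [hsc] at hrec
                simp only [Option.map_some, List.nil_append]
                rw [hrec]
                show _ = (if pvNdFrom m (d :: L) then "VALID" else "INVALID")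
                rw [pvNdFrom]
                by_cases hlt : pvOrderDict.getD d 0 < m
                · simp [hlt, show ¬ m ≤ pvOrderDict.getD d 0 by omega]
                · simp [hlt, show m ≤ pvOrderDict.getD d 0 by omega]
            · have hd' : ¬ (PySem.Chars.isIn [d] ['d', 'f', 'c', 's'] = true) := fun h => hd (hmem.mpr h)
              simp [hd, hd']
        · by_cases hb : c = '\\'
          · simp only [hp, hb, if_neg hp, if_pos rfl]
            match rest with
            | [] => simp
            | d :: rest' =>
              have hmem : (d ∈ (['n', 't', '\\', '"'] : List Char)) ↔
                  (PySem.Chars.isIn [d] ['n', 't', '\\', '"'] = true) := by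
                rw [pvIsIn_singleton]; simp
              by_cases hd : d ∈ (['n', 't', '\\', '"'] : List Char)
              · have hd' := hmem.mp hd
                simp only [hd, hd', if_pos rfl, if_pos hd]
                exact IH rest' (by simp at hk ⊢; omega) m
              · have hd' : ¬ (PySem.Chars.isIn [d] ['n', 't', '\\', '"'] = true) := fun h => hd (hmem.mpr h)
                simp [hd, hd']
          · simp only [if_neg hp, if_neg hb]
            exact IH rest (by simp at hk ⊢; omega) m
  exact fun st m => main st.length st le_rfl m

-- B's zip-all order test equals the chain check, for any lower bound below the first value
theorem pvZipAll_eq_ndFrom : ∀ (L : List Char) (m : Int),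
    (∀ c, L.head? = some c → m ≤ pvOrderDict.getD c 0) →
    ((List.zip (L.map (fun c => pvOrderDict.getD c 0)) (L.map (fun c => pvOrderDict.getD c 0)).tail).all
        (fun p => decide (p.1 ≤ p.2))) = pvNdFrom m L := by
  intro L
  induction L with
  | nil => intro m _; simp [pvNdFrom]
  | cons c L IH =>
    intro m hm
    have hmc : m ≤ pvOrderDict.getD c 0 := hm c rfl
    match L with
    | [] => simp [pvNdFrom, hmc]
    | d :: L' =>
      rw [pvNdFrom]
      by_cases hcd : pvOrderDict.getD c 0 ≤ pvOrderDict.getD d 0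
      · have := IH (pvOrderDict.getD c 0) (by intro e he; simp at he; subst he; exact hcd)
        simp only [List.map_cons, List.tail_cons, List.zip_cons_cons, List.all_cons] at this ⊢
        rw [this]; simp [hmc, hcd]
      · simp only [List.map_cons, List.tail_cons, List.zip_cons_cons, List.all_cons]
        rw [pvNdFrom]
        simp [hcd, show ¬ pvOrderDict.getD c 0 ≤ pvOrderDict.getD d 0 from hcd]

-- ===== VERDICT (by name: the statement is the Claim_ definition above) =====
theorem is_valid_format_spec : Claim_equal_is_valid_format := by
  intro s _
  unfold Spec_is_valid_format is_valid_format is_valid_format_alt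
  rw [pvLoopA_eq_listA, List.drop_zero, pvListA_eq_scan]
  cases h : pvScanB s.toList [] with
  | none => simp
  | some L =>
    simp only []
    rw [pvZipAll_eq_ndFrom L (-1) (by
      intro c _
      have := pvOrderDict_getD_nonneg c
      omega)]
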